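-- pv_equiv track=rewrite | github.com/Keeper-Security/keeper-sdk-python | keepercli-package/src/keepercli/commands/enterprise_utils.py | expand_managed_nodes
-- ===== SOURCE A (Python) =====
-- from typing import Set, Dict, Iterable, List, Any, Union, Optional, Tuple
--
-- def expand_managed_nodes(managed_nodes: Dict[int, bool], subnodes: Dict[int, Set[int]]) -> Dict[int, Set[int]]:
--     result: Dict[int, Set[int]] = {}
--     for node_id, cascade in managed_nodes.items():
--         nodes = [node_id]
--         if cascade:
--             pos = 0
--             while pos < len(nodes):
--                 n_id = nodes[pos]
--                 pos += 1
--                 if n_id in subnodes: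
--                     nodes.extend(subnodes[n_id])
--             result[node_id] = set(nodes)
--     # TODO get rid of duplicates
--     return result
-- ===== SOURCE B (Python) =====
-- def expand_managed_nodes(managed_nodes, subnodes):
--     # Visited-set BFS per cascaded root: each node is enqueued at most once,
--     # instead of A's enumerate-all-paths worklist deduplicated at the end.
--     result = {}
--     for node_id, cascade in managed_nodes.items():
--         if cascade:
--             seen = {node_id}
--             frontier = [node_id]
--             while frontier:
--                 next_frontier = []
--                 for n in frontier:
--                     for c in subnodes.get(n, ()):
--                         if c not in seen:
--                             seen.add(c)
--                             next_frontier.append(c)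
--                 frontier = next_frontier
--             result[node_id] = seen
--     return result
-- ===== Notes on version B (the rewrite author's own statement) =====
-- stated objective: alternative
-- what changed: A expands each cascaded node by appending the children of every occurrence in a growing worklist (enumerating every path, deduplicating only at the end with set()); B runs a visited-set level BFS that enqueues each node at most once.
import Mathlib
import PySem

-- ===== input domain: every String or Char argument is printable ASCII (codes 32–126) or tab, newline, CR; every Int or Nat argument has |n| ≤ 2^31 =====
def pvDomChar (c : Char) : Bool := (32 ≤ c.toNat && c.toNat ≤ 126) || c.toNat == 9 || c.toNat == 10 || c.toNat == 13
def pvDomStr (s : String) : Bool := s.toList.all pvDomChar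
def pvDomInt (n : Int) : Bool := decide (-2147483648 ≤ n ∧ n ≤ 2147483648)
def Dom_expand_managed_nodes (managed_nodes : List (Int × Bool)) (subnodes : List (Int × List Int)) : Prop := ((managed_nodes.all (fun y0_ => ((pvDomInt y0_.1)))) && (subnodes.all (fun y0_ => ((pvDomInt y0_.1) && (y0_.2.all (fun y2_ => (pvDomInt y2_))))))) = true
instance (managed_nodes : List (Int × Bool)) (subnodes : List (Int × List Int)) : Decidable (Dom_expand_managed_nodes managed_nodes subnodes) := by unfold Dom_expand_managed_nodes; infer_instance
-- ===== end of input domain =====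

-- B replaces A's enumerate-every-path worklist (deduplicated only at the end by set())
-- with a visited-set level BFS that enqueues each node at most once; objective: alternative.

-- children of n in the subnode graph: subnodes[n] if present, else [] (shared graph accessor)
def chS (subnodes : List (Int × List Int)) (n : Int) : List Int :=
  match (PySem.Dict.mk subnodes).get? n with
  | some cs => cs
  | none => []

-- ===== PORT A =====
-- A's while loop over the growing 'nodes' list, as state (done, queue) with nodes = done ++ queue.
-- The fuel only makes the loop total: under Pre_ (acyclic graph) it is proved sufficient.
def loopA (subnodes : List (Int × List Int)) : Nat → List Int → List Int → List Int
  | 0, done, queue => done ++ queue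
  | _ + 1, done, [] => done
  | fuel + 1, done, n :: rest =>
      match (PySem.Dict.mk subnodes).get? n with
      | some cs => loopA subnodes fuel (done ++ [n]) (rest ++ cs)
      | none => loopA subnodes fuel (done ++ [n]) rest

-- concatenation of the first m breadth levels
def accLvlA (subnodes : List (Int × List Int)) : Nat → List Int → List Int
  | 0, _ => []
  | m + 1, q => q ++ accLvlA subnodes m (q.flatMap (chS subnodes))

def fuelA (subnodes : List (Int × List Int)) (r : Int) : Nat :=
  (accLvlA subnodes (subnodes.length + 1) [r]).length

def expand_managed_nodes (managed_nodes : List (Int × Bool)) (subnodes : List (Int × List Int)) : List (Int × List Int) :=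
  (managed_nodes.foldl
    (fun (result : PySem.Dict Int (List Int)) p =>
      if p.2 then
        result.insert p.1 (PySem.Set.ofList (loopA subnodes (fuelA subnodes p.1) [] [p.1]))
      else result)
    PySem.Dict.empty).items

-- ===== PORT B =====
-- inner step: if c not in seen: seen.add(c); next_frontier.append(c)
def bAdd (st : PySem.Set Int × List Int) (c : Int) : PySem.Set Int × List Int :=
  if PySem.Set.contains st.1 c then st else (PySem.Set.add st.1 c, st.2 ++ [c])

-- one level: for n in frontier: for c in subnodes.get(n, ()): …
def bLevel (subnodes : List (Int × List Int)) (seen : PySem.Set Int) (frontier : List Int) :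
    PySem.Set Int × List Int :=
  frontier.foldl (fun st n => (chS subnodes n).foldl bAdd st) (seen, [])

-- while frontier: …  (fuel only makes the loop total; each level discovers a new node or stops)
def loopB (subnodes : List (Int × List Int)) : Nat → PySem.Set Int → List Int → PySem.Set Int
  | 0, seen, _ => seen
  | fuel + 1, seen, frontier =>
      if frontier.isEmpty then seen
      else
        let st := bLevel subnodes seen frontier
        loopB subnodes fuel st.1 st.2

def fuelB (subnodes : List (Int × List Int)) : Nat :=
  subnodes.length + (subnodes.map (fun p => p.2.length)).sum + 2

def expand_managed_nodes_alt (managed_nodes : List (Int × Bool)) (subnodes : List (Int × List Int)) : List (Int × List Int) :=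
  (managed_nodes.foldl
    (fun (result : PySem.Dict Int (List Int)) p =>
      if p.2 then
        result.insert p.1 (loopB subnodes (fuelB subnodes) (PySem.Set.ofList [p.1]) [p.1])
      else result)
    PySem.Dict.empty).items

-- ===== PRECONDITION & SPEC =====
-- saturation of a node set under "add all children" (graph reachability closure)
def saturStep (subnodes : List (Int × List Int)) (S : PySem.Set Int) : PySem.Set Int :=
  PySem.Set.update S (S.flatMap (chS subnodes))

def satur (subnodes : List (Int × List Int)) : Nat → PySem.Set Int → PySem.Set Int
  | 0, S => S | k + 1, S => satur subnodes k (saturStep subnodes S)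

def reachFrom (subnodes : List (Int × List Int)) (xs : List Int) : PySem.Set Int :=
  satur subnodes ((subnodes.map (fun p => p.2.length)).sum + 1) (PySem.Set.ofList xs)

-- Pre_ excludes exactly the inputs on which some cascaded managed node can reach a directed
-- cycle of the subnode graph: there A's worklist loop never terminates (B returns the set).
def Pre_expand_managed_nodes (managed_nodes : List (Int × Bool)) (subnodes : List (Int × List Int)) : Prop :=
  ∀ pm ∈ managed_nodes, pm.2 = true →
    ∀ k ∈ reachFrom subnodes [pm.1], k ∉ reachFrom subnodes (chS subnodes k)

instance (managed_nodes : List (Int × Bool)) (subnodes : List (Int × List Int)) : Decidable (Pre_expand_managed_nodes managed_nodes subnodes) := by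
  unfold Pre_expand_managed_nodes; infer_instance

def pvWitness_expand_managed_nodes : (List (Int × Bool)) × (List (Int × List Int)) :=
  ([(1, true), (2, false), (7, true)], [(1, [2, 3]), (3, [4, 2]), (4, [])])

def Spec_expand_managed_nodes (managed_nodes : List (Int × Bool)) (subnodes : List (Int × List Int)) (out : List (Int × List Int)) : Prop := out = expand_managed_nodes_alt managed_nodes subnodes
instance (managed_nodes : List (Int × Bool)) (subnodes : List (Int × List Int)) (out : List (Int × List Int)) : Decidable (Spec_expand_managed_nodes managed_nodes subnodes out) := by unfold Spec_expand_managed_nodes; infer_instance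

-- ===== CLAIM (what is proved, stated in full; the proofs are below) =====
def Claim_equal_expand_managed_nodes : Prop := ∀ (managed_nodes : List (Int × Bool)) (subnodes : List (Int × List Int)), Dom_expand_managed_nodes managed_nodes subnodes → Pre_expand_managed_nodes managed_nodes subnodes → Spec_expand_managed_nodes managed_nodes subnodes (expand_managed_nodes managed_nodes subnodes)

-- ===== LEMMAS AND PROOFS =====

-- breadth levels of the subnode graph (proof-side view of the worklist's progress)
def lvlA (subnodes : List (Int × List Int)) : Nat → List Int → List Int
  | 0, q => q
  | d + 1, q => lvlA subnodes d (q.flatMap (chS subnodes))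

theorem pv_witness_ok :
    Dom_expand_managed_nodes pvWitness_expand_managed_nodes.1 pvWitness_expand_managed_nodes.2 ∧
    Pre_expand_managed_nodes pvWitness_expand_managed_nodes.1 pvWitness_expand_managed_nodes.2 := by
  decide

-- ---- A-side: the worklist loop consumes the breadth levels in order ----

theorem loopA_cons (sub : List (Int × List Int)) (fuel : Nat) (done : List Int) (n : Int) (rest : List Int) :
    loopA sub (fuel + 1) done (n :: rest) = loopA sub fuel (done ++ [n]) (rest ++ chS sub n) := by
  unfold chS
  cases h : (PySem.Dict.mk sub).get? n <;> simp [loopA, h]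

theorem accLvlA_nil (sub : List (Int × List Int)) (m : Nat) : accLvlA sub m [] = [] := by
  induction m with
  | zero => rfl
  | succ m ih => simpa [accLvlA] using ih

theorem accLvlA_rot (sub : List (Int × List Int)) (m : Nat) :
    ∀ a b : List Int, lvlA sub (m + 1) a = [] →
      accLvlA sub (m + 1) (a ++ b) = a ++ accLvlA sub (m + 1) (b ++ a.flatMap (chS sub)) := by
  induction m with
  | zero =>
      intro a b ha
      have hfa : a.flatMap (chS sub) = [] := ha
      simp [accLvlA, hfa]
  | succ m ih =>
      intro a b ha
      have ha' : lvlA sub (m + 1) (a.flatMap (chS sub)) = [] := ha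
      show (a ++ b) ++ accLvlA sub (m + 1) ((a ++ b).flatMap (chS sub)) = _
      rw [List.flatMap_append, ih _ _ ha']
      simp [accLvlA, List.flatMap_append, List.append_assoc]

theorem loopA_run (sub : List (Int × List Int)) (m : Nat) (R : List Int)
    (hclosed : ∀ x ∈ R, ∀ c ∈ chS sub x, c ∈ R)
    (hg : ∀ x ∈ R, lvlA sub (m + 1) [x] = []) :
    ∀ fuel (done q : List Int), (∀ x ∈ q, x ∈ R) → (accLvlA sub (m + 1) q).length ≤ fuel →
      loopA sub fuel done q = done ++ accLvlA sub (m + 1) q := by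
  intro fuel
  induction fuel with
  | zero =>
      intro done q _ h
      have hq : q = [] := by
        have : q.length = 0 := by
          simp only [accLvlA, List.length_append] at h
          omega
        exact List.eq_nil_of_length_eq_zero this
      subst hq
      simp [loopA, accLvlA_nil]
  | succ fuel ih =>
      intro done q hqR h
      cases q with
      | nil => simp [loopA, accLvlA_nil]
      | cons n rest =>
          have hrot := accLvlA_rot sub m [n] rest (hg n (hqR n List.mem_cons_self))
          have hrot' : accLvlA sub (m + 1) (n :: rest)
              = n :: accLvlA sub (m + 1) (rest ++ chS sub n) := by
            simpa using hrot
          have hqR' : ∀ x ∈ rest ++ chS sub n, x ∈ R := by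
            intro x hx
            rcases List.mem_append.mp hx with hx | hx
            · exact hqR x (List.mem_cons_of_mem _ hx)
            · exact hclosed n (hqR n List.mem_cons_self) x hx
          rw [loopA_cons, ih (done ++ [n]) (rest ++ chS sub n) hqR'
            (by rw [hrot'] at h; simp at h; omega)]
          rw [hrot']
          simp

-- ---- graph reachability: saturation is a closure, acyclicity kills deep levels ----

def ChainR (sub : List (Int × List Int)) : Int → List Int → Prop
  | _, [] => True
  | a, b :: p => b ∈ chS sub a ∧ ChainR sub b p

theorem chS_sub_allCh (sub : List (Int × List Int)) (n c : Int) (h : c ∈ chS sub n) :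
    c ∈ sub.flatMap (fun p => p.2) := by
  unfold chS at h
  cases hg : (PySem.Dict.mk sub).get? n with
  | none => rw [hg] at h; cases h
  | some cs =>
      rw [hg] at h
      exact List.mem_flatMap.mpr ⟨(n, cs), PySem.Dict.mem_items_of_get?_eq_some _ hg, h⟩

theorem key_mem (sub : List (Int × List Int)) (n : Int) (h : chS sub n ≠ []) :
    n ∈ sub.map (fun p => p.1) := by
  unfold chS at h
  cases hg : (PySem.Dict.mk sub).get? n with
  | none => rw [hg] at h; exact absurd rfl h
  | some cs =>
      exact List.mem_map.mpr ⟨(n, cs), PySem.Dict.mem_items_of_get?_eq_some _ hg, rfl⟩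

theorem satur_mem_mono (sub : List (Int × List Int)) (k : Nat) :
    ∀ (S : PySem.Set Int) (x : Int), x ∈ S → x ∈ satur sub k S := by
  induction k with
  | zero => intro S x hx; exact hx
  | succ k ih =>
      intro S x hx
      exact ih _ x ((PySem.Set.mem_update _ _ _).mpr (Or.inl hx))

theorem satur_least (sub : List (Int × List Int)) (T : List Int)
    (hT : ∀ x ∈ T, ∀ c ∈ chS sub x, c ∈ T) (k : Nat) :
    ∀ (S : PySem.Set Int), (∀ x ∈ S, x ∈ T) → ∀ x ∈ satur sub k S, x ∈ T := by
  induction k with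
  | zero => intro S hS x hx; exact hS x hx
  | succ k ih =>
      intro S hS x hx
      refine ih _ ?_ x hx
      intro y hy
      rcases (PySem.Set.mem_update _ _ _).mp hy with h | h
      · exact hS y h
      · rcases List.mem_flatMap.mp h with ⟨z, hz, hyz⟩
        exact hT z (hS z hz) y hyz

theorem reach_base (sub : List (Int × List Int)) (xs : List Int) (x : Int) (h : x ∈ xs) :
    x ∈ reachFrom sub xs :=
  satur_mem_mono sub _ _ x ((PySem.Set.mem_ofList _ _).mpr h)

theorem satur_succ_right (sub : List (Int × List Int)) (k : Nat) :
    ∀ S, satur sub (k + 1) S = saturStep sub (satur sub k S) := by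
  induction k with
  | zero => intro S; rfl
  | succ k ih =>
      intro S
      show satur sub (k + 1) (saturStep sub S) = _
      rw [ih]
      rfl

theorem satur_fixed (sub : List (Int × List Int)) (T : PySem.Set Int)
    (h : saturStep sub T = T) : ∀ j, satur sub j T = T := by
  intro j
  induction j with
  | zero => rfl
  | succ j ih => rw [satur_succ_right, ih, h]

theorem satur_add (sub : List (Int × List Int)) (a b : Nat) :
    ∀ S, satur sub (a + b) S = satur sub b (satur sub a S) := by
  induction a with
  | zero => intro S; simp [satur]
  | succ a ih =>
      intro S
      rw [Nat.succ_add]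
      show satur sub (a + b) (saturStep sub S) = _
      rw [ih]
      rfl

theorem update_ne_grow (S : PySem.Set Int) (xs : List Int)
    (h : PySem.Set.update S xs ≠ S) : S.length + 1 ≤ (PySem.Set.update S xs).length := by
  rw [PySem.Set.update_eq_append_filter] at h ⊢
  cases hf : (PySem.Set.ofList xs).filter (fun y => !(PySem.Set.contains S y)) with
  | nil => rw [hf] at h; simp at h
  | cons z zs => simp

theorem nodup_satur (sub : List (Int × List Int)) (k : Nat) :
    ∀ S : PySem.Set Int, S.Nodup → (satur sub k S).Nodup := by
  induction k with
  | zero => intro S h; exact h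
  | succ k ih => intro S h; exact ih _ (PySem.Set.nodup_update _ _ h)

theorem satur_sub_univ (sub : List (Int × List Int)) (k : Nat) (S : PySem.Set Int) :
    ∀ x ∈ satur sub k S, x ∈ S ++ sub.flatMap (fun p => p.2) := by
  refine satur_least sub _ ?_ k S (fun x hx => List.mem_append.mpr (Or.inl hx))
  intro x _ c hc
  exact List.mem_append.mpr (Or.inr (chS_sub_allCh sub x c hc))

theorem length_le_of_nodup_subset (l l' : List Int) (h : l.Nodup)
    (hs : ∀ x ∈ l, x ∈ l') : l.length ≤ l'.length := by
  calc l.length = l.toFinset.card := (List.toFinset_card_of_nodup h).symm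
    _ ≤ l'.toFinset.card := by
          refine Finset.card_le_card ?_
          intro x hx
          rw [List.mem_toFinset] at hx ⊢
          exact hs x hx
    _ ≤ l'.length := l'.toFinset_card_le

theorem exists_fix (sub : List (Int × List Int)) (S : PySem.Set Int) (hnd : S.Nodup) :
    ∃ k ≤ (sub.map (fun p => p.2.length)).sum,
      saturStep sub (satur sub k S) = satur sub k S := by
  set C := (sub.map (fun p => p.2.length)).sum with hC
  by_contra hcon
  push_neg at hcon
  have grow : ∀ k, k ≤ C + 1 → S.length + k ≤ (satur sub k S).length := by
    intro k
    induction k with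
    | zero => intro _; show S.length + 0 ≤ S.length; omega
    | succ k ih =>
        intro hk
        have hne : saturStep sub (satur sub k S) ≠ satur sub k S := hcon k (by omega)
        have h1 := ih (by omega)
        have h2 : (satur sub k S).length + 1 ≤ (saturStep sub (satur sub k S)).length :=
          update_ne_grow _ _ hne
        rw [satur_succ_right]
        omega
  have up : (satur sub (C + 1) S).length ≤ S.length + C := by
    have h1 := length_le_of_nodup_subset (satur sub (C + 1) S) (S ++ sub.flatMap (fun p => p.2))
      (nodup_satur sub _ S hnd) (satur_sub_univ sub _ S)
    have h2 : (sub.flatMap (fun p => p.2)).length = C := by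
      rw [List.length_flatMap]
    rw [List.length_append, h2] at h1
    exact h1
  have := grow (C + 1) le_rfl
  omega

theorem closed_reachFrom (sub : List (Int × List Int)) (xs : List Int) :
    ∀ x ∈ reachFrom sub xs, ∀ c ∈ chS sub x, c ∈ reachFrom sub xs := by
  obtain ⟨k, hk, hfix⟩ := exists_fix sub (PySem.Set.ofList xs) (PySem.Set.nodup_ofList _)
  set C := (sub.map (fun p => p.2.length)).sum with hC
  have h1 : reachFrom sub xs = satur sub k (PySem.Set.ofList xs) := by
    show satur sub (C + 1) _ = _
    have hsplit : C + 1 = k + (C + 1 - k) := by omega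
    rw [hsplit, satur_add, satur_fixed sub _ hfix]
  rw [h1]
  intro x hx c hc
  have hmem : c ∈ saturStep sub (satur sub k (PySem.Set.ofList xs)) :=
    (PySem.Set.mem_update _ _ _).mpr (Or.inr (List.mem_flatMap.mpr ⟨x, hx, hc⟩))
  rw [hfix] at hmem
  exact hmem

theorem reach_trans (sub : List (Int × List Int)) (xs : List Int) (b c : Int)
    (hb : b ∈ reachFrom sub xs) (hc : c ∈ reachFrom sub (chS sub b)) :
    c ∈ reachFrom sub xs := by
  have hT := closed_reachFrom sub xs
  exact satur_least sub _ hT _ _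
    (fun y hy => hT b hb y ((PySem.Set.mem_ofList _ _).mp hy)) c hc

theorem chain_mem_reach (sub : List (Int × List Int)) :
    ∀ (p : List Int) (a : Int), ChainR sub a p →
      ∀ x ∈ p, x ∈ reachFrom sub (chS sub a) := by
  intro p
  induction p with
  | nil => intro a _ x hx; cases hx
  | cons b p' ih =>
      intro a hc x hx
      obtain ⟨hab, hbc⟩ := hc
      rcases List.mem_cons.mp hx with rfl | hx
      · exact reach_base sub _ x hab
      · exact reach_trans sub _ b x (reach_base sub _ b hab) (ih b hbc x hx)

theorem chain_nodup (sub : List (Int × List Int)) (R : List Int)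
    (hclosed : ∀ x ∈ R, ∀ c ∈ chS sub x, c ∈ R)
    (hnoself : ∀ x ∈ R, x ∉ reachFrom sub (chS sub x)) :
    ∀ (p : List Int) (a : Int), a ∈ R → ChainR sub a p → (a :: p).Nodup := by
  intro p
  induction p with
  | nil => intro a _ _; simp
  | cons b p' ih =>
      intro a haR hc
      obtain ⟨hab, hbc⟩ := hc
      have hbR : b ∈ R := hclosed a haR b hab
      have hself : a ∉ reachFrom sub (chS sub a) := hnoself a haR
      refine List.nodup_cons.mpr ⟨?_, ih b hbR hbc⟩
      intro hmem
      rcases List.mem_cons.mp hmem with rfl | h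
      · exact hself (reach_base sub _ a hab)
      · exact hself (reach_trans sub _ b a (reach_base sub _ b hab)
          (chain_mem_reach sub p' b hbc a h))

theorem chain_keys (sub : List (Int × List Int)) :
    ∀ (p : List Int) (a : Int), ChainR sub a p →
      ∀ x ∈ (a :: p).dropLast, x ∈ sub.map (fun p => p.1) := by
  intro p
  induction p with
  | nil => intro a _ x hx; simp at hx
  | cons b p' ih =>
      intro a hc x hx
      obtain ⟨hab, hbc⟩ := hc
      rw [List.dropLast_cons₂] at hx
      rcases List.mem_cons.mp hx with rfl | hx
      · exact key_mem sub x (fun h => by rw [h] at hab; cases hab)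
      · exact ih b hbc x hx

theorem chain_of_mem_lvl (sub : List (Int × List Int)) :
    ∀ (d : Nat) (q : List Int) (x : Int), x ∈ lvlA sub d q →
      ∃ r ∈ q, ∃ p : List Int, ChainR sub r p ∧ p.length = d := by
  intro d
  induction d with
  | zero => intro q x hx; exact ⟨x, hx, [], trivial, rfl⟩
  | succ d ih =>
      intro q x hx
      obtain ⟨r', hr', p, hcp, hl⟩ := ih _ x hx
      rcases List.mem_flatMap.mp hr' with ⟨r, hr, hcr⟩
      exact ⟨r, hr, r' :: p, ⟨hcr, hcp⟩, by simp [hl]⟩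

theorem root_death (sub : List (Int × List Int)) (r : Int)
    (hr : ∀ k ∈ reachFrom sub [r], k ∉ reachFrom sub (chS sub k)) :
    lvlA sub (sub.length + 1) [r] = [] := by
  rw [List.eq_nil_iff_forall_not_mem]
  intro x hx
  obtain ⟨r', hr', p, hcp, hl⟩ := chain_of_mem_lvl sub _ _ x hx
  rcases List.mem_singleton.mp hr' with rfl
  have haR : r' ∈ reachFrom sub [r'] := reach_base sub [r'] r' (by simp)
  have hnd : (r' :: p).Nodup :=
    chain_nodup sub (reachFrom sub [r']) (closed_reachFrom sub [r']) hr p r' haR hcp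
  have hk := chain_keys sub p r' hcp
  have hnd' : ((r' :: p).dropLast).Nodup := (List.dropLast_sublist (r' :: p)).nodup hnd
  have hlen : ((r' :: p).dropLast).length = sub.length + 1 := by
    rw [List.length_dropLast]
    simp [hl]
  have hle := length_le_of_nodup_subset _ _ hnd' hk
  rw [hlen, List.length_map] at hle
  omega

-- ---- first-new-occurrence scans: the common language of set(nodes) and B's visited BFS ----

def FN (s : List Int) : List Int → List Int
  | [] => []
  | x :: xs => if x ∈ s then FN s xs else x :: FN (s ++ [x]) xs

theorem FN_append (a : List Int) : ∀ (s b : List Int),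
    FN s (a ++ b) = FN s a ++ FN (s ++ FN s a) b := by
  induction a with
  | nil => intro s b; simp [FN]
  | cons x a' ih =>
      intro s b
      by_cases hx : x ∈ s
      · simp only [List.cons_append, FN, if_pos hx]
        exact ih s b
      · simp only [List.cons_append, FN, if_neg hx]
        rw [ih (s ++ [x]) b]
        simp [List.append_assoc]

theorem FN_nil_of_forall (s : List Int) : ∀ xs : List Int, (∀ x ∈ xs, x ∈ s) → FN s xs = [] := by
  intro xs
  induction xs with
  | nil => intro _; rfl
  | cons x xs' ih => intro h; simp [FN, h x (by simp), ih (fun y hy => h y (by simp [hy]))]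

theorem FN_cover (xs : List Int) : ∀ (s : List Int) (x : Int), x ∈ xs → x ∈ s ∨ x ∈ FN s xs := by
  induction xs with
  | nil => intro s x hx; cases hx
  | cons y ys ih =>
      intro s x hx
      by_cases hy : y ∈ s
      · simp only [FN, if_pos hy]
        rcases List.mem_cons.mp hx with rfl | hx
        · exact Or.inl hy
        · exact ih s x hx
      · simp only [FN, if_neg hy]
        rcases List.mem_cons.mp hx with rfl | hx
        · exact Or.inr List.mem_cons_self
        · rcases ih (s ++ [y]) x hx with h | h
          · rcases List.mem_append.mp h with h | h
            · exact Or.inl h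
            · exact Or.inr (by simp [List.mem_singleton.mp h])
          · exact Or.inr (List.mem_cons_of_mem _ h)

theorem foldl_add_eq_FN (xs : List Int) : ∀ s : List Int,
    xs.foldl PySem.Set.add s = s ++ FN s xs := by
  induction xs with
  | nil => intro s; simp [FN]
  | cons x xs' ih =>
      intro s
      by_cases hx : x ∈ s
      · simp only [List.foldl_cons, PySem.Set.add_of_mem hx, FN, if_pos hx]
        exact ih s
      · simp only [List.foldl_cons, PySem.Set.add_of_not_mem hx, FN, if_neg hx]
        rw [ih (s ++ [x])]
        simp

theorem ofList_eq_FN (xs : List Int) : PySem.Set.ofList xs = FN [] xs := by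
  rw [PySem.Set.ofList_eq_foldl, foldl_add_eq_FN]
  rfl

-- B's inner two loops discover exactly the first new occurrences, in order
theorem bAdd_foldl (cs : List Int) : ∀ (S : PySem.Set Int) (t : List Int),
    cs.foldl bAdd (S, t) = (S ++ FN S cs, t ++ FN S cs) := by
  induction cs with
  | nil => intro S t; simp [FN]
  | cons c cs' ih =>
      intro S t
      by_cases hc : c ∈ S
      · have hcon : PySem.Set.contains S c = true := by
          rw [PySem.Set.contains_eq_listContains]
          exact List.contains_iff_mem.mpr hc
        simp only [List.foldl_cons, bAdd, hcon, if_true, FN, if_pos hc]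
        exact ih S t
      · have hcon : PySem.Set.contains S c = false := by
          rw [PySem.Set.contains_eq_listContains]
          simpa using hc
        simp only [List.foldl_cons, bAdd, hcon, Bool.false_eq_true, if_false, FN, if_neg hc,
          PySem.Set.add_of_not_mem hc]
        rw [ih (S ++ [c]) (t ++ [c])]
        simp [List.append_assoc]

theorem bLevel_eq (sub : List (Int × List Int)) (f : List Int) :
    ∀ (S : PySem.Set Int) (t : List Int),
      f.foldl (fun st n => (chS sub n).foldl bAdd st) (S, t)
        = (S ++ FN S (f.flatMap (chS sub)), t ++ FN S (f.flatMap (chS sub))) := by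
  induction f with
  | nil => intro S t; simp [FN]
  | cons n f' ih =>
      intro S t
      simp only [List.foldl_cons]
      rw [bAdd_foldl (chS sub n) S t, ih, List.flatMap_cons, FN_append]
      simp [List.append_assoc]

theorem loopB_nil (sub : List (Int × List Int)) (fuel : Nat) (S : PySem.Set Int) :
    loopB sub fuel S [] = S := by
  cases fuel <;> simp [loopB]

-- scanning a whole raw level for new nodes = scanning only its fresh frontier part
theorem FN_flat_dedup (sub : List (Int × List Int)) :
    ∀ (q s₀ S : List Int), (∀ x ∈ s₀, ∀ c ∈ chS sub x, c ∈ S) →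
      FN S (q.flatMap (chS sub)) = FN S ((FN s₀ q).flatMap (chS sub)) := by
  intro q
  induction q with
  | nil => intro s₀ S _; rfl
  | cons x qt ih =>
      intro s₀ S h
      by_cases hx : x ∈ s₀
      · have hchx : FN S (chS sub x) = [] := FN_nil_of_forall S _ (h x hx)
        simp only [List.flatMap_cons, FN_append, hchx, List.append_nil, List.nil_append, FN,
          if_pos hx]
        exact ih s₀ S h
      · simp only [FN, if_neg hx, List.flatMap_cons, FN_append]
        congr 1
        refine ih (s₀ ++ [x]) (S ++ FN S (chS sub x)) ?_
        intro y hy c hc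
        rcases List.mem_append.mp hy with hy | hy
        · exact List.mem_append.mpr (Or.inl (h y hy c hc))
        · rcases List.mem_singleton.mp hy with rfl
          rcases FN_cover (chS sub y) S c hc with h' | h'
          · exact List.mem_append.mpr (Or.inl h')
          · exact List.mem_append.mpr (Or.inr h')

-- everything in later levels of a closed, already-seen queue stays seen
theorem accLvl_closed (sub : List (Int × List Int)) (s₀ : List Int)
    (hcl : ∀ x ∈ s₀, ∀ c ∈ chS sub x, c ∈ s₀) :
    ∀ (m : Nat) (q : List Int), (∀ x ∈ q, x ∈ s₀) → ∀ x ∈ accLvlA sub m q, x ∈ s₀ := by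
  intro m
  induction m with
  | zero => intro q _ x hx; cases hx
  | succ m ih =>
      intro q hq x hx
      rcases List.mem_append.mp hx with hx | hx
      · exact hq x hx
      · refine ih _ ?_ x hx
        intro y hy
        rcases List.mem_flatMap.mp hy with ⟨z, hz, hyz⟩
        exact hcl z (hq z hz) y hyz

-- the simulation: B's visited BFS computes seen ++ (first new occurrences of A's level list)
theorem simB (sub : List (Int × List Int)) :
    ∀ (m : Nat) (q s₀ : List Int) (fuel : Nat), m ≤ fuel → lvlA sub m q = [] →
      (∀ x ∈ s₀, ∀ c ∈ chS sub x, c ∈ s₀ ++ FN s₀ q) →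
      loopB sub fuel (s₀ ++ FN s₀ q) (FN s₀ q)
        = (s₀ ++ FN s₀ q) ++ FN (s₀ ++ FN s₀ q) (accLvlA sub m q) := by
  intro m
  induction m with
  | zero =>
      intro q s₀ fuel _ hdead _
      have hq : q = [] := hdead
      subst hq
      simp [FN, loopB_nil, accLvlA]
  | succ m ih =>
      intro q s₀ fuel hfu hdead hpre
      have hsubq : ∀ x ∈ q, x ∈ s₀ ++ FN s₀ q := by
        intro x hx
        rcases FN_cover q s₀ x hx with h | h
        · exact List.mem_append.mpr (Or.inl h)
        · exact List.mem_append.mpr (Or.inr h)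
      have hFNq : FN (s₀ ++ FN s₀ q) q = [] := FN_nil_of_forall _ _ hsubq
      have hRHS : FN (s₀ ++ FN s₀ q) (accLvlA sub (m + 1) q)
          = FN (s₀ ++ FN s₀ q) (accLvlA sub m (q.flatMap (chS sub))) := by
        rw [show accLvlA sub (m + 1) q = q ++ accLvlA sub m (q.flatMap (chS sub)) from rfl,
          FN_append, hFNq]
        simp
      by_cases hf0 : FN s₀ q = []
      · -- empty frontier: everything already seen, nothing more is ever discovered
        have hqs : ∀ x ∈ q, x ∈ s₀ := by
          intro x hx
          rcases FN_cover q s₀ x hx with h | h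
          · exact h
          · rw [hf0] at h; cases h
        have hcl : ∀ x ∈ s₀, ∀ c ∈ chS sub x, c ∈ s₀ := by
          intro x hx c hc
          have := hpre x hx c hc
          rwa [hf0, List.append_nil] at this
        have hclosed : ∀ x ∈ accLvlA sub (m + 1) q, x ∈ s₀ :=
          accLvl_closed sub s₀ hcl (m + 1) q hqs
        have hFNacc : FN (s₀ ++ FN s₀ q) (accLvlA sub (m + 1) q) = [] :=
          FN_nil_of_forall _ _ (fun x hx => List.mem_append.mpr (Or.inl (hclosed x hx)))
        rw [hFNacc, hf0, loopB_nil]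
        simp
      · obtain ⟨fu, rfl⟩ : ∃ fu, fuel = fu + 1 := ⟨fuel - 1, by omega⟩
        have hemp : ¬ ((FN s₀ q).isEmpty = true) := by
          simpa [List.isEmpty_iff] using hf0
        have hstep : loopB sub (fu + 1) (s₀ ++ FN s₀ q) (FN s₀ q)
            = loopB sub fu ((s₀ ++ FN s₀ q) ++ FN (s₀ ++ FN s₀ q) (q.flatMap (chS sub)))
                (FN (s₀ ++ FN s₀ q) (q.flatMap (chS sub))) := by
          show (if (FN s₀ q).isEmpty = true then s₀ ++ FN s₀ q
            else loopB sub fu (bLevel sub (s₀ ++ FN s₀ q) (FN s₀ q)).1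
              (bLevel sub (s₀ ++ FN s₀ q) (FN s₀ q)).2) = _
          rw [if_neg hemp]
          unfold bLevel
          rw [bLevel_eq sub (FN s₀ q) (s₀ ++ FN s₀ q) []]
          rw [← FN_flat_dedup sub q s₀ (s₀ ++ FN s₀ q) hpre]
          rfl
        have hpre' : ∀ x ∈ s₀ ++ FN s₀ q, ∀ c ∈ chS sub x,
            c ∈ (s₀ ++ FN s₀ q) ++ FN (s₀ ++ FN s₀ q) (q.flatMap (chS sub)) := by
          intro x hx c hc
          rcases List.mem_append.mp hx with hx | hx
          · exact List.mem_append.mpr (Or.inl (hpre x hx c hc))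
          · have hcf : c ∈ (FN s₀ q).flatMap (chS sub) := List.mem_flatMap.mpr ⟨x, hx, hc⟩
            rcases FN_cover _ (s₀ ++ FN s₀ q) c hcf with h | h
            · exact List.mem_append.mpr (Or.inl h)
            · rw [← FN_flat_dedup sub q s₀ (s₀ ++ FN s₀ q) hpre] at h
              exact List.mem_append.mpr (Or.inr h)
        have hdead' : lvlA sub m (q.flatMap (chS sub)) = [] := hdead
        have ihh := ih (q.flatMap (chS sub)) (s₀ ++ FN s₀ q) fu (by omega) hdead' hpre'
        rw [hstep, ihh, hRHS]
        cases m with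
        | zero =>
            have hq' : q.flatMap (chS sub) = [] := hdead
            simp [hq', FN, accLvlA]
        | succ m' =>
            have hq'sub : ∀ x ∈ q.flatMap (chS sub),
                x ∈ (s₀ ++ FN s₀ q) ++ FN (s₀ ++ FN s₀ q) (q.flatMap (chS sub)) := by
              intro x hx
              rcases FN_cover _ (s₀ ++ FN s₀ q) x hx with h | h
              · exact List.mem_append.mpr (Or.inl h)
              · exact List.mem_append.mpr (Or.inr h)
            have hz : FN ((s₀ ++ FN s₀ q) ++ FN (s₀ ++ FN s₀ q) (q.flatMap (chS sub)))
                (q.flatMap (chS sub)) = [] := FN_nil_of_forall _ _ hq'sub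
            rw [show accLvlA sub (m' + 1) (q.flatMap (chS sub))
              = q.flatMap (chS sub)
                ++ accLvlA sub m' ((q.flatMap (chS sub)).flatMap (chS sub)) from rfl]
            rw [FN_append, FN_append, hz]
            simp [List.append_assoc]

-- ---- per cascaded root, the two ports produce the same list ----

theorem root_eq (sub : List (Int × List Int)) (r : Int)
    (hr : ∀ k ∈ reachFrom sub [r], k ∉ reachFrom sub (chS sub k)) :
    PySem.Set.ofList (loopA sub (fuelA sub r) [] [r])
      = loopB sub (fuelB sub) (PySem.Set.ofList [r]) [r] := by
  have hsubR : ∀ x ∈ reachFrom sub [r], ∀ k ∈ reachFrom sub [x], k ∈ reachFrom sub [r] := by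
    intro x hx k hk
    refine satur_least sub _ (closed_reachFrom sub [r]) _ _ ?_ k hk
    intro y hy
    have hyx : y = x := List.mem_singleton.mp ((PySem.Set.mem_ofList _ _).mp hy)
    subst hyx
    exact hx
  have hg : ∀ x ∈ reachFrom sub [r], lvlA sub (sub.length + 1) [x] = [] := by
    intro x hx
    exact root_death sub x (fun k hk => hr k (hsubR x hx k hk))
  have hrR : r ∈ reachFrom sub [r] := reach_base sub [r] r (by simp)
  have hrun := loopA_run sub sub.length (reachFrom sub [r]) (closed_reachFrom sub [r]) hg
    (fuelA sub r) [] [r]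
    (by intro x hx; rcases List.mem_singleton.mp hx with rfl; exact hrR) (Nat.le_refl _)
  rw [hrun, List.nil_append, ofList_eq_FN]
  have hFNr : FN [] [r] = [r] := by simp [FN]
  have hofr : PySem.Set.ofList [r] = [r] := by rw [ofList_eq_FN, hFNr]
  have hsim := simB sub (sub.length + 1) [r] [] (fuelB sub)
    (by unfold fuelB; omega) (hg r hrR) (by intro x hx; cases hx)
  rw [hFNr] at hsim
  simp only [List.nil_append] at hsim
  rw [hofr, hsim]
  rw [show accLvlA sub (sub.length + 1) [r]
    = [r] ++ accLvlA sub sub.length ([r].flatMap (chS sub)) from rfl]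
  rw [FN_append, FN_append, hFNr]
  rw [FN_nil_of_forall [r] [r] (fun x hx => hx)]
  simp

theorem fold_congr (sub : List (Int × List Int)) :
    ∀ (l : List (Int × Bool)),
      (∀ pm ∈ l, pm.2 = true →
        ∀ k ∈ reachFrom sub [pm.1], k ∉ reachFrom sub (chS sub k)) →
      ∀ (d : PySem.Dict Int (List Int)),
      l.foldl (fun result p =>
          if p.2 then
            result.insert p.1 (PySem.Set.ofList (loopA sub (fuelA sub p.1) [] [p.1]))
          else result) d
        = l.foldl (fun result p =>
          if p.2 then
            result.insert p.1 (loopB sub (fuelB sub) (PySem.Set.ofList [p.1]) [p.1])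
          else result) d := by
  intro l
  induction l with
  | nil => intro _ d; rfl
  | cons p l' ih =>
      intro hl d
      simp only [List.foldl_cons]
      by_cases hp : p.2 = true
      · rw [root_eq sub p.1 (hl p List.mem_cons_self hp)]
        exact ih (fun pm hm => hl pm (List.mem_cons_of_mem _ hm)) _
      · simp only [hp]
        exact ih (fun pm hm => hl pm (List.mem_cons_of_mem _ hm)) _

-- ===== VERDICT (by name: the statement is the Claim_ definition above) =====
theorem expand_managed_nodes_spec : Claim_equal_expand_managed_nodes := by
  intro mg sub _ hpre
  show expand_managed_nodes mg sub = expand_managed_nodes_alt mg sub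
  unfold expand_managed_nodes expand_managed_nodes_alt
  rw [fold_congr sub mg hpre]
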